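-- pv_equiv track=rewrite | github.com/pypi-data/pypi-mirror-403 | packages/adjusted-identity/adjusted_identity-0.2.5.tar.gz/adjusted_identity-0.2.5/adjusted_identity/__init__.py | _find_scoring_region
-- ===== SOURCE A (Python) =====
-- def _find_scoring_region(seq1_aligned, seq2_aligned, end_skip_distance):
--     """
--     Find the [start, end] region of the alignment where mismatches should be counted.
--
--     Implements MycoBLAST "digital end trimming" by skipping the first/last end_skip_distance
--     nucleotides (not alignment positions) from each sequence to avoid counting sequencing
--     artifacts near read ends.
--
--     Special case: When end_skip_distance=0, only score positions where both sequences
--     have non-gap characters (no overhang scoring).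
--
--     IMPORTANT: This function counts NUCLEOTIDES (non-gap characters), not alignment positions.
--     End trimming only activates when both sequences have >= end_skip_distance nucleotides
--     available to skip from each end.
--
--     Behavior:
--     - end_skip_distance=0: Score only overlap region (both sequences have content)
--     - Short sequences (< 2×end_skip_distance nucleotides): Returns full range [0, len-1]
--     - Long sequences (≥ 2×end_skip_distance nucleotides): Returns trimmed range excluding ends
--     - Gap characters ('-') are ignored when counting nucleotides
--
--     Example:
--         seq1_aligned = "AAAA-TCGX-TTTT"  # 12 nucleotides, 14 alignment positions
--         seq2_aligned = "-AAAATCGA-TTTT"  # 12 nucleotides, 14 alignment positions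
--         end_skip_distance = 3
--
--         Result: Skip first 3 and last 3 nucleotides from each sequence
--         → scoring_start=4, scoring_end=9 (positions where middle nucleotides align)
--
--     Args:
--         seq1_aligned, seq2_aligned: Aligned sequences with gaps (must be same length)
--         end_skip_distance: Number of nucleotides to skip from each end (typically 20)
--
--     Returns:
--         tuple: (scoring_start, scoring_end) - inclusive range of alignment positions to score
--     """
--     alignment_length = len(seq1_aligned)
--
--     # Special case: end_skip_distance=0 means score only overlap region
--     if end_skip_distance == 0:
--         # Find first position where both sequences have content
--         scoring_start = 0
--         for pos in range(alignment_length):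
--             if seq1_aligned[pos] != '-' and seq2_aligned[pos] != '-':
--                 scoring_start = pos
--                 break
--
--         # Find last position where both sequences have content
--         scoring_end = alignment_length - 1
--         for pos in range(alignment_length - 1, -1, -1):
--             if seq1_aligned[pos] != '-' and seq2_aligned[pos] != '-':
--                 scoring_end = pos
--                 break
--
--         return scoring_start, scoring_end
--
--     # General case: skip end_skip_distance nucleotides from each end
--     # Find scoring start: first position where both sequences have >= end_skip_distance bp
--     seq1_count = seq2_count = 0
--     scoring_start = 0
--     for pos in range(alignment_length):
--         if seq1_aligned[pos] != '-':
--             seq1_count += 1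
--         if seq2_aligned[pos] != '-':
--             seq2_count += 1
--         if seq1_count >= end_skip_distance and seq2_count >= end_skip_distance:
--             scoring_start = pos
--             break
--
--     # Find scoring end: last position where both sequences have >= end_skip_distance bp remaining
--     seq1_count = seq2_count = 0
--     scoring_end = alignment_length - 1
--     for pos in range(alignment_length - 1, -1, -1):
--         if seq1_aligned[pos] != '-':
--             seq1_count += 1
--         if seq2_aligned[pos] != '-':
--             seq2_count += 1
--         if seq1_count >= end_skip_distance and seq2_count >= end_skip_distance:
--             scoring_end = pos
--             break
--
--     return scoring_start, scoring_end
-- ===== SOURCE B (Python) =====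
-- def _find_scoring_region(seq1_aligned, seq2_aligned, end_skip_distance):
--     n = len(seq1_aligned)
--     d = end_skip_distance
--     if d == 0:
--         common = [i for i in range(n)
--                   if seq1_aligned[i] != '-' and seq2_aligned[i] != '-']
--         return (common[0], common[-1]) if common else (0, n - 1)
--     if d < 0:
--         # the counter condition holds at the very first/last position scanned
--         return (0, n - 1)
--     pos1 = [i for i in range(n) if seq1_aligned[i] != '-']
--     pos2 = [i for i in range(n) if seq2_aligned[i] != '-']
--     if len(pos1) >= d and len(pos2) >= d:
--         return (max(pos1[d - 1], pos2[d - 1]),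
--                 min(pos1[len(pos1) - d], pos2[len(pos2) - d]))
--     return (0, n - 1)
-- ===== Notes on version B (the rewrite author's own statement) =====
-- stated objective: simpler
-- what changed: Replaces A's four interleaved counter scans with early break by building the index lists of non-gap positions once and selecting the boundaries arithmetically (max/min of the d-th non-gap position from each end), with a direct comprehension for the d==0 overlap case.
import Mathlib
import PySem

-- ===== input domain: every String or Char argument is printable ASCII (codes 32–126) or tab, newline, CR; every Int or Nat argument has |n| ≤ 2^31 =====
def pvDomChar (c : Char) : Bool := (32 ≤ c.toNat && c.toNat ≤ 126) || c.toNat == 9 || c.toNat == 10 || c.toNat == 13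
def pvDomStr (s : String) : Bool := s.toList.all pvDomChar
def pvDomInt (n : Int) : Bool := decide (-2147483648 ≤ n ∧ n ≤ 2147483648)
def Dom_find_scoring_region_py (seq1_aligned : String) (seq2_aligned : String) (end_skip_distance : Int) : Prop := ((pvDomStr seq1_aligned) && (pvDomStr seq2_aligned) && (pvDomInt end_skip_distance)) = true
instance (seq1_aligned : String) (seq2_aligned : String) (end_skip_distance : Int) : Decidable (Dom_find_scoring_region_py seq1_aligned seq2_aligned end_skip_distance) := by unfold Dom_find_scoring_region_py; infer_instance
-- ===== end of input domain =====

-- B replaces A's four interleaved counter scans with early break by the non-gap position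
-- index lists plus arithmetic selection of the boundaries (objective: simpler; return value only).

-- ===== PORT A =====

def pvNonGap (l : List Char) (p : Nat) : Bool := l.getD p '-' != '-'

def pvScan0 (l1 l2 : List Char) (dflt : Int) : List Nat → Int
  | [] => dflt
  | p :: ps => if pvNonGap l1 p && pvNonGap l2 p then (p : Int) else pvScan0 l1 l2 dflt ps

def pvScan (l1 l2 : List Char) (d dflt : Int) : List Nat → Int → Int → Int
  | [], _, _ => dflt
  | p :: ps, c1, c2 =>
    if d ≤ (if pvNonGap l1 p then c1 + 1 else c1) ∧ d ≤ (if pvNonGap l2 p then c2 + 1 else c2)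
    then (p : Int)
    else pvScan l1 l2 d dflt ps (if pvNonGap l1 p then c1 + 1 else c1)
           (if pvNonGap l2 p then c2 + 1 else c2)

def find_scoring_region_py (seq1_aligned : String) (seq2_aligned : String) (end_skip_distance : Int) : Int × Int :=
  let l1 := seq1_aligned.toList
  let l2 := seq2_aligned.toList
  let n := l1.length
  if end_skip_distance = 0 then
    (pvScan0 l1 l2 0 (List.range n),
     pvScan0 l1 l2 ((n : Int) - 1) (List.range n).reverse)
  else
    (pvScan l1 l2 end_skip_distance 0 (List.range n) 0 0,
     pvScan l1 l2 end_skip_distance ((n : Int) - 1) (List.range n).reverse 0 0)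

-- ===== PORT B =====

def pvNonGapPos (l : List Char) (n : Nat) : List Nat := (List.range n).filter (pvNonGap l)

def find_scoring_region_py_alt (seq1_aligned : String) (seq2_aligned : String) (end_skip_distance : Int) : Int × Int :=
  let l1 := seq1_aligned.toList
  let l2 := seq2_aligned.toList
  let n := l1.length
  let d := end_skip_distance
  if d = 0 then
    let common := (List.range n).filter (fun i => pvNonGap l1 i && pvNonGap l2 i)
    if common.isEmpty then (0, (n : Int) - 1)
    else (((common.headD 0 : Nat) : Int), ((common.getLastD 0 : Nat) : Int))
  else if d < 0 then (0, (n : Int) - 1)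
  else
    let dn := d.toNat
    let p1 := pvNonGapPos l1 n
    let p2 := pvNonGapPos l2 n
    if dn ≤ p1.length ∧ dn ≤ p2.length then
      (max ((p1.getD (dn - 1) 0 : Nat) : Int) ((p2.getD (dn - 1) 0 : Nat) : Int),
       min ((p1.getD (p1.length - dn) 0 : Nat) : Int) ((p2.getD (p2.length - dn) 0 : Nat) : Int))
    else (0, (n : Int) - 1)


-- ===== PRECONDITION & SPEC =====
-- Python A indexes seq2_aligned at every alignment position of seq1_aligned and raises
-- IndexError when seq2_aligned is shorter (and seq1_aligned nonempty); Pre_ excludes exactly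
-- those inputs — A returns normally everywhere inside Pre_ and nowhere outside it.
def Pre_find_scoring_region_py (seq1_aligned : String) (seq2_aligned : String) (end_skip_distance : Int) : Prop :=
  seq1_aligned.toList.length ≤ seq2_aligned.toList.length

instance (seq1_aligned : String) (seq2_aligned : String) (end_skip_distance : Int) : Decidable (Pre_find_scoring_region_py seq1_aligned seq2_aligned end_skip_distance) := by unfold Pre_find_scoring_region_py; infer_instance

def pvWitness_find_scoring_region_py : String × String × Int := ("AA-A", "A-AA", 1)

def Spec_find_scoring_region_py (seq1_aligned : String) (seq2_aligned : String) (end_skip_distance : Int) (out : Int × Int) : Prop := out = find_scoring_region_py_alt seq1_aligned seq2_aligned end_skip_distance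
instance (seq1_aligned : String) (seq2_aligned : String) (end_skip_distance : Int) (out : Int × Int) : Decidable (Spec_find_scoring_region_py seq1_aligned seq2_aligned end_skip_distance out) := by unfold Spec_find_scoring_region_py; infer_instance

-- ===== CLAIM (what is proved, stated in full; the proofs are below) =====
def Claim_equal_find_scoring_region_py : Prop := ∀ (seq1_aligned : String) (seq2_aligned : String) (end_skip_distance : Int), Dom_find_scoring_region_py seq1_aligned seq2_aligned end_skip_distance → Pre_find_scoring_region_py seq1_aligned seq2_aligned end_skip_distance → Spec_find_scoring_region_py seq1_aligned seq2_aligned end_skip_distance (find_scoring_region_py seq1_aligned seq2_aligned end_skip_distance)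

-- ===== LEMMAS AND PROOFS =====

lemma pvScan0_eq (l1 l2 : List Char) (dflt : Int) (ps : List Nat) :
    pvScan0 l1 l2 dflt ps =
      (((ps.filter (fun i => pvNonGap l1 i && pvNonGap l2 i)).head?.map (Nat.cast : Nat → Int)).getD dflt) := by
  induction ps with
  | nil => simp [pvScan0]
  | cons p ps ih =>
    by_cases h : (pvNonGap l1 p && pvNonGap l2 p) = true
    · simp [pvScan0, h]
    · simp [pvScan0, h, ih]

lemma pvFilter_getD_mem (g : Nat → Bool) (ps : List Nat) (k : Nat) (hk : k < (ps.filter g).length) :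
    (ps.filter g).getD k 0 ∈ ps := by
  rw [List.getD_eq_getElem _ _ hk]
  exact List.mem_of_mem_filter (List.getElem_mem _)

lemma pvScan_eq (l1 l2 : List Char) (d dflt : Int) (comb : Int → Int → Int)
    (hcomb : ∀ a : Int, comb a a = a) :
    ∀ (ps : List Nat),
      ps.Pairwise (fun (a b : Nat) => comb (a : Int) (b : Int) = (b : Int) ∧ comb (b : Int) (a : Int) = (b : Int)) →
    ∀ (c1 c2 : Int),
    pvScan l1 l2 d dflt ps c1 c2 =
      (if d ≤ c1 then
        if d ≤ c2 then ((ps.head?.map (Nat.cast : Nat → Int)).getD dflt)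
        else if (d - c2).toNat ≤ (ps.filter (pvNonGap l2)).length then
          (((ps.filter (pvNonGap l2)).getD ((d - c2).toNat - 1) 0 : Nat) : Int)
        else dflt
      else if d ≤ c2 then
        if (d - c1).toNat ≤ (ps.filter (pvNonGap l1)).length then
          (((ps.filter (pvNonGap l1)).getD ((d - c1).toNat - 1) 0 : Nat) : Int)
        else dflt
      else
        if (d - c1).toNat ≤ (ps.filter (pvNonGap l1)).length ∧ (d - c2).toNat ≤ (ps.filter (pvNonGap l2)).length then
          comb (((ps.filter (pvNonGap l1)).getD ((d - c1).toNat - 1) 0 : Nat) : Int)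
               (((ps.filter (pvNonGap l2)).getD ((d - c2).toNat - 1) 0 : Nat) : Int)
        else dflt) := by
  intro ps
  induction ps with
  | nil =>
    intro _ c1 c2
    simp only [pvScan, List.filter_nil, List.length_nil, List.head?_nil, Option.map_none,
      Option.getD_none]
    split_ifs <;> first | rfl | omega
  | cons p ps ih =>
    intro hpair c1 c2
    rcases List.pairwise_cons.mp hpair with ⟨hp, hps⟩
    have IH := ih hps
    by_cases hb1 : pvNonGap l1 p = true <;> by_cases hb2 : pvNonGap l2 p = true
    · -- both non-gap at p
      have hf1 : List.filter (pvNonGap l1) (p :: ps) = p :: List.filter (pvNonGap l1) ps := by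
        simp [hb1]
      have hf2 : List.filter (pvNonGap l2) (p :: ps) = p :: List.filter (pvNonGap l2) ps := by
        simp [hb2]
      simp only [pvScan, hb1, hb2, if_true]
      rw [hf1, hf2]
      by_cases hA : d ≤ c1 + 1
      · by_cases hB : d ≤ c2 + 1
        · -- break at p
          rw [if_pos ⟨hA, hB⟩]
          by_cases h1 : d ≤ c1
          · by_cases h2 : d ≤ c2
            · rw [if_pos h1, if_pos h2]; simp
            · rw [if_pos h1, if_neg h2,
                if_pos (show (d - c2).toNat ≤ (p :: List.filter (pvNonGap l2) ps).length by
                  simp only [List.length_cons]; omega)]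
              have e : (d - c2).toNat - 1 = 0 := by omega
              rw [e, List.getD_cons_zero]
          · by_cases h2 : d ≤ c2
            · rw [if_neg h1, if_pos h2,
                if_pos (show (d - c1).toNat ≤ (p :: List.filter (pvNonGap l1) ps).length by
                  simp only [List.length_cons]; omega)]
              have e : (d - c1).toNat - 1 = 0 := by omega
              rw [e, List.getD_cons_zero]
            · rw [if_neg h1, if_neg h2,
                if_pos ⟨by simp only [List.length_cons]; omega,
                        by simp only [List.length_cons]; omega⟩]
              have e1 : (d - c1).toNat - 1 = 0 := by omega
              have e2 : (d - c2).toNat - 1 = 0 := by omega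
              rw [e1, e2, List.getD_cons_zero, List.getD_cons_zero, hcomb]
        · -- seq2 not yet at d after p
          have h2 : ¬ d ≤ c2 := by omega
          rw [if_neg (fun h => hB h.2), IH, if_pos hA, if_neg hB]
          by_cases h1 : d ≤ c1
          · rw [if_pos h1, if_neg h2]
            by_cases hl : (d - (c2 + 1)).toNat ≤ (List.filter (pvNonGap l2) ps).length
            · rw [if_pos hl,
                if_pos (show (d - c2).toNat ≤ (p :: List.filter (pvNonGap l2) ps).length by
                  simp only [List.length_cons]; omega)]
              have e : (d - c2).toNat - 1 = ((d - (c2 + 1)).toNat - 1) + 1 := by omega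
              rw [e, List.getD_cons_succ]
            · rw [if_neg hl, if_neg (by
                rintro h; apply hl
                simp only [List.length_cons] at h; omega)]
          · rw [if_neg h1, if_neg h2]
            by_cases hl : (d - (c2 + 1)).toNat ≤ (List.filter (pvNonGap l2) ps).length
            · rw [if_pos hl,
                if_pos ⟨show (d - c1).toNat ≤ (p :: List.filter (pvNonGap l1) ps).length by
                    simp only [List.length_cons]; omega,
                  show (d - c2).toNat ≤ (p :: List.filter (pvNonGap l2) ps).length by
                    simp only [List.length_cons]; omega⟩]
              have e1 : (d - c1).toNat - 1 = 0 := by omega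
              have e2 : (d - c2).toNat - 1 = ((d - (c2 + 1)).toNat - 1) + 1 := by omega
              rw [e1, e2, List.getD_cons_zero, List.getD_cons_succ]
              have hkmem : (List.filter (pvNonGap l2) ps).getD ((d - (c2 + 1)).toNat - 1) 0 ∈ ps :=
                pvFilter_getD_mem _ _ _ (by omega)
              have hcmb := hp ((List.filter (pvNonGap l2) ps).getD ((d - (c2 + 1)).toNat - 1) 0) hkmem
              exact hcmb.1.symm
            · rw [if_neg hl, if_neg (by
                rintro ⟨-, h⟩; apply hl
                simp only [List.length_cons] at h; omega)]
      · -- seq1 not yet at d after p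
        have h1 : ¬ d ≤ c1 := by omega
        rw [if_neg (fun h => hA h.1), IH, if_neg hA]
        by_cases hB : d ≤ c2 + 1
        · rw [if_pos hB]
          by_cases h2 : d ≤ c2
          · rw [if_neg h1, if_pos h2]
            by_cases hl : (d - (c1 + 1)).toNat ≤ (List.filter (pvNonGap l1) ps).length
            · rw [if_pos hl,
                if_pos (show (d - c1).toNat ≤ (p :: List.filter (pvNonGap l1) ps).length by
                  simp only [List.length_cons]; omega)]
              have e : (d - c1).toNat - 1 = ((d - (c1 + 1)).toNat - 1) + 1 := by omega
              rw [e, List.getD_cons_succ]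
            · rw [if_neg hl, if_neg (by
                rintro h; apply hl
                simp only [List.length_cons] at h; omega)]
          · rw [if_neg h1, if_neg h2]
            by_cases hl : (d - (c1 + 1)).toNat ≤ (List.filter (pvNonGap l1) ps).length
            · rw [if_pos hl,
                if_pos ⟨show (d - c1).toNat ≤ (p :: List.filter (pvNonGap l1) ps).length by
                    simp only [List.length_cons]; omega,
                  show (d - c2).toNat ≤ (p :: List.filter (pvNonGap l2) ps).length by
                    simp only [List.length_cons]; omega⟩]
              have e1 : (d - c1).toNat - 1 = ((d - (c1 + 1)).toNat - 1) + 1 := by omega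
              have e2 : (d - c2).toNat - 1 = 0 := by omega
              rw [e1, e2, List.getD_cons_succ, List.getD_cons_zero]
              have hkmem : (List.filter (pvNonGap l1) ps).getD ((d - (c1 + 1)).toNat - 1) 0 ∈ ps :=
                pvFilter_getD_mem _ _ _ (by omega)
              have hcmb := hp ((List.filter (pvNonGap l1) ps).getD ((d - (c1 + 1)).toNat - 1) 0) hkmem
              exact hcmb.2.symm
            · rw [if_neg hl, if_neg (by
                rintro ⟨h, -⟩; apply hl
                simp only [List.length_cons] at h; omega)]
        · -- neither side reaches d: both counters advance, filters both gain p
          have h2 : ¬ d ≤ c2 := by omega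
          rw [if_neg hB, if_neg h1, if_neg h2]
          by_cases hl : (d - (c1 + 1)).toNat ≤ (List.filter (pvNonGap l1) ps).length ∧
              (d - (c2 + 1)).toNat ≤ (List.filter (pvNonGap l2) ps).length
          · rw [if_pos hl,
              if_pos ⟨show (d - c1).toNat ≤ (p :: List.filter (pvNonGap l1) ps).length by
                  simp only [List.length_cons]; omega,
                show (d - c2).toNat ≤ (p :: List.filter (pvNonGap l2) ps).length by
                  simp only [List.length_cons]; omega⟩]
            have e1 : (d - c1).toNat - 1 = ((d - (c1 + 1)).toNat - 1) + 1 := by omega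
            have e2 : (d - c2).toNat - 1 = ((d - (c2 + 1)).toNat - 1) + 1 := by omega
            rw [e1, e2, List.getD_cons_succ, List.getD_cons_succ]
          · rw [if_neg hl, if_neg (by
              rintro ⟨ha, hb⟩; apply hl
              simp only [List.length_cons] at ha hb
              exact ⟨by omega, by omega⟩)]
    · -- p non-gap in seq1 only
      have hf1 : List.filter (pvNonGap l1) (p :: ps) = p :: List.filter (pvNonGap l1) ps := by
        simp [hb1]
      have hf2 : List.filter (pvNonGap l2) (p :: ps) = List.filter (pvNonGap l2) ps := by
        simp [hb2]
      simp only [pvScan, hb1, hb2, Bool.false_eq_true, if_true, if_false]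
      rw [hf1, hf2]
      by_cases hA : d ≤ c1 + 1
      · by_cases h2 : d ≤ c2
        · -- break at p
          rw [if_pos ⟨hA, h2⟩]
          by_cases h1 : d ≤ c1
          · rw [if_pos h1, if_pos h2]; simp
          · rw [if_neg h1, if_pos h2,
              if_pos (show (d - c1).toNat ≤ (p :: List.filter (pvNonGap l1) ps).length by
                simp only [List.length_cons]; omega)]
            have e : (d - c1).toNat - 1 = 0 := by omega
            rw [e, List.getD_cons_zero]
        · -- seq2 still short of d
          rw [if_neg (fun h => h2 h.2), IH, if_pos hA, if_neg h2]
          by_cases h1 : d ≤ c1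
          · rw [if_pos h1, if_neg h2]
          · rw [if_neg h1, if_neg h2]
            by_cases hl : (d - c2).toNat ≤ (List.filter (pvNonGap l2) ps).length
            · rw [if_pos hl,
                if_pos ⟨show (d - c1).toNat ≤ (p :: List.filter (pvNonGap l1) ps).length by
                    simp only [List.length_cons]; omega, hl⟩]
              have e1 : (d - c1).toNat - 1 = 0 := by omega
              rw [e1, List.getD_cons_zero]
              have hkmem : (List.filter (pvNonGap l2) ps).getD ((d - c2).toNat - 1) 0 ∈ ps :=
                pvFilter_getD_mem _ _ _ (by omega)
              have hcmb := hp ((List.filter (pvNonGap l2) ps).getD ((d - c2).toNat - 1) 0) hkmem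
              exact hcmb.1.symm
            · rw [if_neg hl, if_neg (fun h => hl h.2)]
      · -- seq1 still short of d
        have h1 : ¬ d ≤ c1 := by omega
        rw [if_neg (fun h => hA h.1), IH, if_neg hA]
        by_cases h2 : d ≤ c2
        · rw [if_pos h2, if_neg h1, if_pos h2]
          by_cases hl : (d - (c1 + 1)).toNat ≤ (List.filter (pvNonGap l1) ps).length
          · rw [if_pos hl,
              if_pos (show (d - c1).toNat ≤ (p :: List.filter (pvNonGap l1) ps).length by
                simp only [List.length_cons]; omega)]
            have e : (d - c1).toNat - 1 = ((d - (c1 + 1)).toNat - 1) + 1 := by omega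
            rw [e, List.getD_cons_succ]
          · rw [if_neg hl, if_neg (by
              rintro h; apply hl
              simp only [List.length_cons] at h; omega)]
        · rw [if_neg h2, if_neg h1, if_neg h2]
          by_cases hl : (d - (c1 + 1)).toNat ≤ (List.filter (pvNonGap l1) ps).length ∧
              (d - c2).toNat ≤ (List.filter (pvNonGap l2) ps).length
          · obtain ⟨hl1, hl2⟩ := hl
            rw [if_pos ⟨hl1, hl2⟩,
              if_pos ⟨show (d - c1).toNat ≤ (p :: List.filter (pvNonGap l1) ps).length by
                  simp only [List.length_cons]; omega, hl2⟩]
            have e : (d - c1).toNat - 1 = ((d - (c1 + 1)).toNat - 1) + 1 := by omega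
            rw [e, List.getD_cons_succ]
          · rw [if_neg hl, if_neg (by
              rintro ⟨ha, hb⟩; apply hl
              simp only [List.length_cons] at ha
              exact ⟨by omega, hb⟩)]
    · -- p non-gap in seq2 only
      have hf1 : List.filter (pvNonGap l1) (p :: ps) = List.filter (pvNonGap l1) ps := by
        simp [hb1]
      have hf2 : List.filter (pvNonGap l2) (p :: ps) = p :: List.filter (pvNonGap l2) ps := by
        simp [hb2]
      simp only [pvScan, hb1, hb2, Bool.false_eq_true, if_true, if_false]
      rw [hf1, hf2]
      by_cases hB : d ≤ c2 + 1
      · by_cases h1 : d ≤ c1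
        · -- break at p
          rw [if_pos ⟨h1, hB⟩]
          by_cases h2 : d ≤ c2
          · rw [if_pos h1, if_pos h2]; simp
          · rw [if_pos h1, if_neg h2,
              if_pos (show (d - c2).toNat ≤ (p :: List.filter (pvNonGap l2) ps).length by
                simp only [List.length_cons]; omega)]
            have e : (d - c2).toNat - 1 = 0 := by omega
            rw [e, List.getD_cons_zero]
        · -- seq1 still short of d
          rw [if_neg (fun h => h1 h.1), IH, if_neg h1]
          by_cases h2 : d ≤ c2
          · rw [if_pos hB, if_neg h1, if_pos h2]
          · rw [if_pos hB, if_neg h1, if_neg h2]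
            by_cases hl : (d - c1).toNat ≤ (List.filter (pvNonGap l1) ps).length
            · rw [if_pos hl,
                if_pos ⟨hl, show (d - c2).toNat ≤ (p :: List.filter (pvNonGap l2) ps).length by
                    simp only [List.length_cons]; omega⟩]
              have e2 : (d - c2).toNat - 1 = 0 := by omega
              rw [e2, List.getD_cons_zero]
              have hkmem : (List.filter (pvNonGap l1) ps).getD ((d - c1).toNat - 1) 0 ∈ ps :=
                pvFilter_getD_mem _ _ _ (by omega)
              have hcmb := hp ((List.filter (pvNonGap l1) ps).getD ((d - c1).toNat - 1) 0) hkmem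
              exact hcmb.2.symm
            · rw [if_neg hl, if_neg (fun h => hl h.1)]
      · -- seq2 still short of d
        have h2 : ¬ d ≤ c2 := by omega
        rw [if_neg (fun h => hB h.2), IH]
        by_cases h1 : d ≤ c1
        · rw [if_pos h1, if_neg hB, if_pos h1, if_neg h2]
          by_cases hl : (d - (c2 + 1)).toNat ≤ (List.filter (pvNonGap l2) ps).length
          · rw [if_pos hl,
              if_pos (show (d - c2).toNat ≤ (p :: List.filter (pvNonGap l2) ps).length by
                simp only [List.length_cons]; omega)]
            have e : (d - c2).toNat - 1 = ((d - (c2 + 1)).toNat - 1) + 1 := by omega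
            rw [e, List.getD_cons_succ]
          · rw [if_neg hl, if_neg (by
              rintro h; apply hl
              simp only [List.length_cons] at h; omega)]
        · rw [if_neg h1, if_neg hB, if_neg h1, if_neg h2]
          by_cases hl : (d - c1).toNat ≤ (List.filter (pvNonGap l1) ps).length ∧
              (d - (c2 + 1)).toNat ≤ (List.filter (pvNonGap l2) ps).length
          · obtain ⟨hl1, hl2⟩ := hl
            rw [if_pos ⟨hl1, hl2⟩,
              if_pos ⟨hl1, show (d - c2).toNat ≤ (p :: List.filter (pvNonGap l2) ps).length by
                  simp only [List.length_cons]; omega⟩]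
            have e : (d - c2).toNat - 1 = ((d - (c2 + 1)).toNat - 1) + 1 := by omega
            rw [e, List.getD_cons_succ]
          · rw [if_neg hl, if_neg (by
              rintro ⟨ha, hb⟩; apply hl
              simp only [List.length_cons] at hb
              exact ⟨ha, by omega⟩)]
    · -- p is a gap in both sequences: counters and filters unchanged
      have hf1 : List.filter (pvNonGap l1) (p :: ps) = List.filter (pvNonGap l1) ps := by
        simp [hb1]
      have hf2 : List.filter (pvNonGap l2) (p :: ps) = List.filter (pvNonGap l2) ps := by
        simp [hb2]
      simp only [pvScan, hb1, hb2, Bool.false_eq_true, if_false]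
      rw [hf1, hf2]
      by_cases h1 : d ≤ c1
      · by_cases h2 : d ≤ c2
        · rw [if_pos ⟨h1, h2⟩]; simp [h1, h2]
        · rw [if_neg (fun h => h2 h.2), IH]
          simp only [h1, h2, if_true, if_false]
      · rw [if_neg (fun h => h1 h.1), IH]
        simp only [h1, if_false]


lemma pvRev_getD (l : List Nat) (k : Nat) (hk : k < l.length) :
    l.reverse.getD k 0 = l.getD (l.length - 1 - k) 0 := by
  rw [List.getD_eq_getElem _ _ (by simpa using hk), List.getD_eq_getElem _ _ (by omega),
    List.getElem_reverse]

lemma pv_ports_eq (s1 s2 : String) (d : Int) :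
    find_scoring_region_py s1 s2 d = find_scoring_region_py_alt s1 s2 d := by
  simp only [find_scoring_region_py, find_scoring_region_py_alt, pvNonGapPos]
  by_cases hd0 : d = 0
  · subst hd0
    rw [if_pos rfl, if_pos rfl, pvScan0_eq, pvScan0_eq, List.filter_reverse, List.head?_reverse]
    rcases hcom : (List.range s1.toList.length).filter
        (fun i => pvNonGap s1.toList i && pvNonGap s2.toList i) with _ | ⟨x, xs⟩
    · simp
    · 
      have hy : ∃ y, (x :: xs).getLast? = some y :=
        Option.isSome_iff_exists.mp (by simp [List.getLast?_isSome])
      obtain ⟨y, hy⟩ := hy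
      simp [hy, List.getLastD_eq_getLast?]
  · rw [if_neg hd0, if_neg hd0]
    by_cases hneg : d < 0
    · rw [if_pos hneg]
      cases hn : s1.toList.length with
      | zero => simp [pvScan]
      | succ m =>
        rw [Prod.ext_iff]
        constructor
        · rw [List.range_succ_eq_map]
          simp only [pvScan]
          rw [if_pos ⟨by split_ifs <;> omega, by split_ifs <;> omega⟩]
          simp
        · rw [List.range_succ, List.reverse_append, List.reverse_singleton, List.singleton_append]
          simp only [pvScan]
          rw [if_pos ⟨by split_ifs <;> omega, by split_ifs <;> omega⟩]
          push_cast; ring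
    · rw [if_neg hneg]
      have h0 : ¬ d ≤ (0 : Int) := by omega
      have hpmax : (List.range s1.toList.length).Pairwise
          (fun (a b : Nat) => max (a : Int) (b : Int) = (b : Int) ∧ max (b : Int) (a : Int) = (b : Int)) := by
        refine (List.pairwise_lt_range).imp ?_
        intro a b hab
        have h : (a : Int) ≤ b := by exact_mod_cast hab.le
        exact ⟨max_eq_right h, max_eq_left h⟩
      have hpmin : ((List.range s1.toList.length).reverse).Pairwise
          (fun (a b : Nat) => min (a : Int) (b : Int) = (b : Int) ∧ min (b : Int) (a : Int) = (b : Int)) := by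
        rw [List.pairwise_reverse]
        refine (List.pairwise_lt_range).imp ?_
        intro a b hab
        have h : (a : Int) ≤ b := by exact_mod_cast hab.le
        exact ⟨min_eq_right h, min_eq_left h⟩
      rw [Prod.ext_iff]
      constructor
      · rw [pvScan_eq s1.toList s2.toList d 0 max (fun a => max_self a) _ hpmax 0 0,
          if_neg h0, if_neg h0, sub_zero]
        simp only [apply_ite (Prod.fst)]
      · rw [pvScan_eq s1.toList s2.toList d ((s1.toList.length : Int) - 1) min (fun a => min_self a) _ hpmin 0 0,
          if_neg h0, if_neg h0, sub_zero, List.filter_reverse, List.filter_reverse,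
          List.length_reverse, List.length_reverse]
        simp only [apply_ite (Prod.snd)]
        by_cases hc : d.toNat ≤ ((List.range s1.toList.length).filter (pvNonGap s1.toList)).length ∧
            d.toNat ≤ ((List.range s1.toList.length).filter (pvNonGap s2.toList)).length
        · obtain ⟨hc1, hc2⟩ := hc
          rw [if_pos ⟨hc1, hc2⟩, if_pos ⟨hc1, hc2⟩]
          have hd1 : 1 ≤ d.toNat := by omega
          rw [pvRev_getD _ _ (by omega), pvRev_getD _ _ (by omega)]
          have e1 : ((List.range s1.toList.length).filter (pvNonGap s1.toList)).length - 1 - (d.toNat - 1)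
              = ((List.range s1.toList.length).filter (pvNonGap s1.toList)).length - d.toNat := by omega
          have e2 : ((List.range s1.toList.length).filter (pvNonGap s2.toList)).length - 1 - (d.toNat - 1)
              = ((List.range s1.toList.length).filter (pvNonGap s2.toList)).length - d.toNat := by omega
          rw [e1, e2]
        · rw [if_neg hc, if_neg hc]

-- ===== VERDICT (by name: the statement is the Claim_ definition above) =====
theorem find_scoring_region_py_spec : Claim_equal_find_scoring_region_py := by
  intro s1 s2 d _ _
  unfold Spec_find_scoring_region_py
  exact pv_ports_eq s1 s2 d
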